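-- pv_equiv track=rewrite | github.com/stalj/pp1 | 13-Test3/mock2/lastpreps/p1.py | f
-- ===== SOURCE A (Python) =====
-- def f(n):
--     n=int(n)
--     a=''
--     if n>0:
--         a=a+"/"*n
--         a='-'.join(a[i:i+5] for i in range(0,len(a),5))
--         return a
--     else:
--         return a
-- ===== SOURCE B (Python) =====
-- def f(n):
--     n = int(n)
--     if n <= 0:
--         return ''
--     q, r = divmod(n, 5)
--     chunks = ['/' * 5] * q
--     if r:
--         chunks.append('/' * r)
--     return '-'.join(chunks)
-- ===== Notes on version B (the rewrite author's own statement) =====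
-- stated objective: simpler
-- what changed: Replaces building the full slash string and slicing it over a stride-5 range with divmod chunk counting: q full '/////' chunks by list multiplication plus an optional remainder chunk, joined directly.
import Mathlib
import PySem

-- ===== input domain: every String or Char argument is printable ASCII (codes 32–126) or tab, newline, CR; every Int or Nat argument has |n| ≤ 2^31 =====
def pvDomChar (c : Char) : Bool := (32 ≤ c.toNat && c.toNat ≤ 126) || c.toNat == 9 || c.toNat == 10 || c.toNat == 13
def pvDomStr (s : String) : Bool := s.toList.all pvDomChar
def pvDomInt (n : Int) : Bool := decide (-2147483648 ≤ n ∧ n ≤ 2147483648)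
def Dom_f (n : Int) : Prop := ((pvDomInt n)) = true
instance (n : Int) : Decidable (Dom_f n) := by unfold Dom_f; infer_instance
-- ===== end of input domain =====

-- B replaces A's build-then-slice-over-a-range construction with divmod chunk counting; objective: simpler.

-- ===== PORT A =====
def f (n : Int) : String :=
  let a := ""
  if n > 0 then
    let a := a ++ String.ofList (List.replicate n.toNat '/')
    PySem.Str.join "-" ((PySem.List.pyRange 0 (PySem.Str.len a) 5).map
      (fun i => PySem.Str.slice a (some i) (some (i + 5))))
  else a

-- ===== PORT B =====
def f_alt (n : Int) : String :=
  if n ≤ 0 then ""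
  else
    let q := PySem.Int.floordiv n 5
    let r := PySem.Int.mod n 5
    let chunks := List.replicate q.toNat (String.ofList (List.replicate 5 '/'))
    let chunks := if r ≠ 0 then chunks ++ [String.ofList (List.replicate r.toNat '/')] else chunks
    PySem.Str.join "-" chunks

-- ===== PRECONDITION & SPEC =====
def Spec_f (n : Int) (out : String) : Prop := out = f_alt n
instance (n : Int) (out : String) : Decidable (Spec_f n out) := by unfold Spec_f; infer_instance

-- ===== CLAIM (what is proved, stated in full; the proofs are below) =====
def Claim_equal_f : Prop := ∀ (n : Int), Dom_f n → Spec_f n (f n)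

-- ===== LEMMAS AND PROOFS =====

-- the chunk list A's comprehension produces, over Nat arithmetic
theorem pv_range_chunks (q r : Nat) (hr : r < 5) :
    (List.range ((5*q+r+4)/5)).map (fun k => List.replicate (min 5 (5*q+r - 5*k)) '/')
    = List.replicate q (List.replicate 5 '/') ++ (if r = 0 then [] else [List.replicate r '/']) := by
  induction q with
  | zero =>
      interval_cases r <;> decide
  | succ q ih =>
      have hK : (5*(q+1)+r+4)/5 = (5*q+r+4)/5 + 1 := by omega
      rw [hK, List.range_succ_eq_map, List.map_cons, List.map_map]
      have h0 : List.replicate (min 5 (5*(q+1)+r - 5*0)) '/' = List.replicate 5 '/' := by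
        congr 1; omega
      have h1 : ((fun k => List.replicate (min 5 (5*(q+1)+r - 5*k)) '/') ∘ Nat.succ)
          = fun k => List.replicate (min 5 (5*q+r - 5*k)) '/' := by
        funext k; simp only [Function.comp]; congr 1; omega
      rw [h0, h1, ih]
      simp [List.replicate_succ]

-- A's mapped slice list over the pyRange, reduced to pv_range_chunks' form
theorem pv_slices_eq (m : Nat) :
    (PySem.List.pyRange 0 (m:Int) 5).map
        (fun i => PySem.List.slice (List.replicate m '/') (some i) (some (i + 5)))
    = List.replicate (m/5) (List.replicate 5 '/')
        ++ (if m % 5 = 0 then [] else [List.replicate (m % 5) '/']) := by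
  rw [PySem.List.pyRange_of_pos 0 (m:Int) (by norm_num)]
  have hK : (if (0:Int) < (m:Int) then ((((m:Int)) - 0 + 5 - 1) / 5).toNat else 0) = (m+4)/5 := by
    split_ifs with h <;> omega
  rw [hK, List.map_map]
  have h1 : ((fun i => PySem.List.slice (List.replicate m '/') (some i) (some (i + 5)))
        ∘ fun k : Nat => (0:Int) + 5 * (k:Int))
      = fun k : Nat => List.replicate (min 5 (m - 5*k)) '/' := by
    funext k
    have hc : (0:Int) + 5 * (k:Int) = ((5*k : Nat) : Int) := by push_cast; ring
    have hc5 : ((5*k : Nat) : Int) + 5 = ((5*k : Nat) : Int) + ((5:Nat) : Int) := by norm_num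
    simp only [Function.comp, hc, hc5, PySem.List.slice_natCast_add]
    rw [List.drop_replicate, List.take_replicate]
  rw [h1]
  have hm : m = 5*(m/5) + m%5 := by omega
  conv_lhs => rw [hm]
  exact pv_range_chunks (m/5) (m%5) (by omega)

theorem pv_b_toList (n : Int) (hn : 0 < n) :
    (f_alt n).toList = PySem.Chars.join ['-']
      (List.replicate (n.toNat/5) (List.replicate 5 '/')
        ++ (if n.toNat % 5 = 0 then [] else [List.replicate (n.toNat % 5) '/'])) := by
  have hle : ¬ n ≤ 0 := by omega
  have hq : (PySem.Int.floordiv n 5).toNat = n.toNat / 5 := by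
    simp only [PySem.Int.floordiv]
    rw [Int.fdiv_eq_ediv]; omega
  have hr : PySem.Int.mod n 5 = ((n.toNat % 5 : Nat) : Int) := by
    simp only [PySem.Int.mod]
    rw [Int.fmod_eq_emod]; omega
  simp only [f_alt, if_neg hle, hq, hr, PySem.Str.toList_join]
  have h5 : "/////".toList = List.replicate 5 '/' := by decide
  by_cases h : n.toNat % 5 = 0
  · rw [if_neg (by omega : ¬ (((n.toNat % 5 : Nat) : Int) ≠ 0))]
    simp [h, List.map_replicate, h5]
  · rw [if_pos (by omega : (((n.toNat % 5 : Nat) : Int) ≠ 0)), Int.toNat_natCast]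
    simp [h, List.map_replicate, h5]

theorem pv_a_toList (n : Int) (hn : 0 < n) :
    (f n).toList = PySem.Chars.join ['-']
      (List.replicate (n.toNat/5) (List.replicate 5 '/')
        ++ (if n.toNat % 5 = 0 then [] else [List.replicate (n.toNat % 5) '/'])) := by
  have ha : ("" ++ String.ofList (List.replicate n.toNat '/')).toList
      = List.replicate n.toNat '/' := by simp
  simp only [f, if_pos hn, PySem.Str.toList_join, PySem.Str.len_eq, ha, List.length_replicate]
  have hsep : "-".toList = ['-'] := by decide
  rw [hsep, ← pv_slices_eq n.toNat]
  congr 1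
  rw [List.map_map]
  apply List.map_congr_left
  intro i _
  simp only [Function.comp_apply]
  rw [PySem.Str.toList_slice, PySem.Chars.slice_eq_listSlice, ha]

-- ===== VERDICT (by name: the statement is the Claim_ definition above) =====
theorem f_spec : Claim_equal_f := by
  intro n _
  unfold Spec_f
  by_cases hn : 0 < n
  · have := (pv_a_toList n hn).trans (pv_b_toList n hn).symm
    exact String.toList_inj.mp this
  · simp [f, f_alt, if_neg hn, if_pos (by omega : n ≤ 0)]
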